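-- pv_equiv track=rewrite | github.com/lsst-dm/ldf_ops_tools | usage/usage.py | get_first_last
-- ===== SOURCE A (Python) =====
-- def get_first_last(jobs):
--     """Gets the first and the last index of the code names of the same type,
--     (i.e.: will return the first and last index of the singleFrameDriver jobs)
--     which will allow for color-coding in make-plot.
--
--     Parameters
--     ----------
--     jobs : `list` of `lists`
--         list of the job names from SLURM at a given time step
--
--      Returns
--     -------
--     start_end : `dict` of `list` of `tuple`
--         dictionary containing code names and the start and stop indexes
--         of the code runs.
--     """
--     # Creates dictionary of the first two letters of a job name & the indexes
--     # where those job names can be found.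
--     names = dict()
--     for idx, lst in enumerate(jobs):
--         for job in lst:
--             names.setdefault(job, set()).add(idx)
--
--     # Removes repeated index values for each key and sorts the values into
--     # ascending order.
--     data_final = {k: sorted(v) for k, v in names.items()}
--
--     # Creates a dictionary only listing tuples of the first and last indexes of
--     # when a code was run.  If there are gaps in the indexes, then there will
--     # be multiple tuples for each key, thus denoting when that code started and
--     # stopped. This is done to make the shading in make_plot more accurate.
--     start_end = dict()
--     for key, value in data_final.items():
--         gap = [[s, e] for s, e, in zip(value, value[1:]) if e - s > 1]
--         edges = value[:1] + sum(gap, []) + value[-1:]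
--         start_end[key] = list(zip(edges[::2], edges[1::2]))
--
--     return start_end
-- ===== SOURCE B (Python) =====
-- def get_first_last(jobs):
--     """One pass: indexes arrive in increasing order, so build the (start, end)
--     runs directly per job name, extending or starting the last run, instead of
--     collecting index sets, sorting them and re-scanning for gaps."""
--     runs = {}
--     for idx, lst in enumerate(jobs):
--         for job in lst:
--             r = runs.setdefault(job, [])
--             if not r:
--                 r.append((idx, idx))
--             else:
--                 s, e = r[-1]
--                 if idx == e + 1:
--                     r[-1] = (s, idx)
--                 elif idx > e + 1:
--                     r.append((idx, idx))
--     return runs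
-- ===== Notes on version B (the rewrite author's own statement) =====
-- stated objective: faster
-- what changed: B builds the (start,end) runs directly in one pass, extending or starting the last run per job as indexes arrive in increasing order, instead of collecting per-job index sets, sorting them and re-scanning adjacent pairs for gaps.
import Mathlib
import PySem

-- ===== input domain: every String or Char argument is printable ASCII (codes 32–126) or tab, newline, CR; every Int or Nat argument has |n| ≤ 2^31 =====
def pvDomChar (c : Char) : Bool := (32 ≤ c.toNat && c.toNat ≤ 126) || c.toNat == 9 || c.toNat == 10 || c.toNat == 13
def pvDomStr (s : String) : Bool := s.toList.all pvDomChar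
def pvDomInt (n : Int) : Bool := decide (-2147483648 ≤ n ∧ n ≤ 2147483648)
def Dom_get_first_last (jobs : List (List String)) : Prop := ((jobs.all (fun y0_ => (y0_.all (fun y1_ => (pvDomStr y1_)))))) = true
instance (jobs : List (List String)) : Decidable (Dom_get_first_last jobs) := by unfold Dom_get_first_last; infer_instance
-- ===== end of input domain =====

-- B builds the (start,end) runs per job in one pass (indexes arrive increasing),
-- instead of A's per-job index sets + sort + gap re-scan; objective: faster (asymptotic).

-- ===== PORT A =====
-- edges[::2] / edges[1::2] are extended slices with step 2, which PySem does not
-- provide; ported by hand: pvEveryOther l = l[::2] exactly (every 2nd element from index 0).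
def pvEveryOther {α : Type} : List α → List α
  | [] => []
  | [a] => [a]
  | a :: _ :: t => a :: pvEveryOther t

-- body of A's final loop: gap / edges / zip for one value
def pvRunsA (value : List Int) : List (Int × Int) :=
  let gap : List (List Int) :=
    ((value.zip (PySem.List.slice value (some 1) none)).filter
        (fun p => decide (p.2 - p.1 > 1))).map (fun p => [p.1, p.2])
  let edges : List Int :=
    PySem.List.slice value none (some 1) ++ gap.flatten ++ PySem.List.slice value (some (-1)) none
  List.zip (pvEveryOther edges) (pvEveryOther (PySem.List.slice edges (some 1) none))

def get_first_last (jobs : List (List String)) : List (String × List (Int × Int)) :=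
  -- names.setdefault(job, set()).add(idx)  ≡  names[job] = names.get(job, set()) ∪ {idx}  (Dict.modify)
  let names : PySem.Dict String (PySem.Set Int) :=
    (PySem.List.enumerate jobs 0).foldl
      (fun d p => p.2.foldl (fun d job => d.modify job PySem.Set.empty (fun s => PySem.Set.add s p.1)) d)
      PySem.Dict.empty
  let data_final : PySem.Dict String (List Int) :=
    names.items.foldl (fun d kv => d.insert kv.1 (PySem.List.sorted kv.2 (fun x => x) false)) PySem.Dict.empty
  let start_end : PySem.Dict String (List (Int × Int)) :=
    data_final.items.foldl (fun d kv => d.insert kv.1 (pvRunsA kv.2)) PySem.Dict.empty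
  start_end.items

-- ===== PORT B =====
-- B mutates the run list held in the dict in place; as a dict transformation that is
-- runs[job] = pvBUpdate (runs.get(job, [])) idx  (Dict.modify).
def pvBUpdate (r : List (Int × Int)) (idx : Int) : List (Int × Int) :=
  match r.getLast? with
  | none => [(idx, idx)]                     -- "if not r: r.append((idx, idx))"
  | some (s, e) =>
    if idx == e + 1 then r.dropLast ++ [(s, idx)]
    else if idx > e + 1 then r ++ [(idx, idx)]
    else r

def get_first_last_alt (jobs : List (List String)) : List (String × List (Int × Int)) :=
  ((PySem.List.enumerate jobs 0).foldl
      (fun d p => p.2.foldl (fun d job => d.modify job [] (fun r => pvBUpdate r p.1)) d)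
      PySem.Dict.empty).items

-- ===== PRECONDITION & SPEC =====
def Spec_get_first_last (jobs : List (List String)) (out : List (String × List (Int × Int))) : Prop := out = get_first_last_alt jobs
instance (jobs : List (List String)) (out : List (String × List (Int × Int))) : Decidable (Spec_get_first_last jobs out) := by unfold Spec_get_first_last; infer_instance

-- ===== CLAIM (what is proved, stated in full; the proofs are below) =====
def Claim_equal_get_first_last : Prop := ∀ (jobs : List (List String)), Dom_get_first_last jobs → Spec_get_first_last jobs (get_first_last jobs)

-- ===== LEMMAS AND PROOFS =====

-- l[::2] of a cons, stepping through the tail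
theorem pvEveryOther_cons {α : Type} (x : α) (xs : List α) :
    pvEveryOther (x :: xs) = x :: pvEveryOther xs.tail := by
  cases xs <;> rfl

-- pairs of consecutive elements, as zip(l[::2], l[1::2]) computes them
def pvPairUp {α : Type} : List α → List (α × α)
  | [] => []
  | [_] => []
  | a :: b :: t => (a, b) :: pvPairUp t

theorem pvZip_everyOther (l : List Int) :
    List.zip (pvEveryOther l) (pvEveryOther l.tail) = pvPairUp l := by
  induction l using pvPairUp.induct with
  | case1 => rfl
  | case2 a => rfl
  | case3 a b t ih =>
    simp only [pvPairUp, pvEveryOther, List.tail_cons, pvEveryOther_cons, List.zip_cons_cons]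
    exact congrArg _ ih

theorem pvPairUp_append_even {α : Type} (l m : List α) (h : l.length % 2 = 0) :
    pvPairUp (l ++ m) = pvPairUp l ++ pvPairUp m := by
  induction l using pvPairUp.induct with
  | case1 => rfl
  | case2 a => simp at h
  | case3 a b t ih =>
    simp only [List.length_cons] at h
    simp only [List.cons_append, pvPairUp, ih (by omega)]

theorem pvPairUp_snoc_odd {α : Type} (l : List α) (c : α) (h : l.length % 2 = 1) :
    pvPairUp (l ++ [c]) = pvPairUp l.dropLast ++ [(l.getLast (by rintro rfl; simp at h), c)] := by
  induction l using pvPairUp.induct with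
  | case1 => simp at h
  | case2 a => rfl
  | case3 a b t ih =>
    simp only [List.length_cons] at h
    have ht : t ≠ [] := by rintro rfl; simp at h
    simp only [List.cons_append, pvPairUp]
    rw [ih (by omega)]
    have hdl : (a :: b :: t).dropLast = a :: b :: t.dropLast := by
      simp [List.dropLast_cons_of_ne_nil ht]
    rw [hdl]
    simp [pvPairUp, List.getLast_cons ht]

theorem pvGapFlat_even (m : List (Int × Int)) :
    ((m.map (fun p => [p.1, p.2])).flatten).length % 2 = 0 := by
  induction m with
  | nil => rfl
  | cons p t ih => simp only [List.map_cons, List.flatten_cons, List.length_append, List.length_cons, List.length_nil]; omega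

theorem pvZipTail_snoc (v : List Int) (hv : v ≠ []) (x : Int) :
    (v ++ [x]).zip (v ++ [x]).tail = v.zip v.tail ++ [(v.getLast hv, x)] := by
  induction v with
  | nil => exact absurd rfl hv
  | cons a t ih =>
    cases t with
    | nil => rfl
    | cons b t2 =>
      simp only [List.cons_append, List.tail_cons, List.zip_cons_cons]
      have := ih (by simp)
      simp only [List.cons_append, List.tail_cons] at this
      rw [this]
      simp [List.getLast_cons]

-- the value[1:] / value[:1] / value[-1:] slices of A, spelled out
def pvGapFlat (value : List Int) : List Int :=
  (((value.zip value.tail).filter (fun p => decide (p.2 - p.1 > 1))).map (fun p => [p.1, p.2])).flatten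

theorem pvRunsA_pairUp (value : List Int) :
    pvRunsA value = pvPairUp (value.take 1 ++ pvGapFlat value ++ value.drop (value.length - 1)) := by
  unfold pvRunsA pvGapFlat
  have h2 : PySem.List.slice value none (some 1) = value.take 1 := by
    simpa using PySem.List.slice_to_natCast value 1
  simp only [PySem.List.slice_from_one, PySem.List.slice_from_neg_one, h2]
  exact pvZip_everyOther _

theorem pvDrop_last (v : List Int) (hv : v ≠ []) : v.drop (v.length - 1) = [v.getLast hv] := by
  rcases List.eq_nil_or_concat v with rfl | ⟨l, w, rfl⟩
  · exact absurd rfl hv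
  · simp

-- pvRunsA of a strictly increasing nonempty list, unfolded to head/gaps/last shape
theorem pvRunsA_snoc (v : List Int) (hv : v ≠ []) (x : Int) (hlt : v.getLast hv < x) :
    pvRunsA (v ++ [x]) =
      if x = v.getLast hv + 1 then (pvRunsA v).dropLast ++ [(((pvRunsA v).getLast?.map Prod.fst).getD 0, x)]
      else pvRunsA v ++ [(x, x)] := by
  have htake : (v ++ [x]).take 1 = v.take 1 := by
    cases v with | nil => exact absurd rfl hv | cons a t => rfl
  have hdrop : (v ++ [x]).drop ((v ++ [x]).length - 1) = [x] := by
    rw [List.length_append, List.length_cons, List.length_nil, Nat.add_sub_cancel,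
        List.drop_left]
  have hgap : pvGapFlat (v ++ [x]) =
      pvGapFlat v ++ (if 1 < x - v.getLast hv then [v.getLast hv, x] else []) := by
    unfold pvGapFlat
    rw [pvZipTail_snoc v hv x, List.filter_append, List.map_append, List.flatten_append]
    by_cases hc : 1 < x - v.getLast hv <;> simp [hc]
  have hlen1 : (v.take 1).length = 1 := by
    cases v with | nil => exact absurd rfl hv | cons a t => rfl
  have heven : (pvGapFlat v).length % 2 = 0 := pvGapFlat_even _
  have hm : (v.take 1 ++ pvGapFlat v).length % 2 = 1 := by
    rw [List.length_append, hlen1]; omega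
  have hR : pvPairUp ((v.take 1 ++ pvGapFlat v) ++ [v.getLast hv]) = pvRunsA v := by
    rw [pvRunsA_pairUp, pvDrop_last v hv]
  have hRv : pvRunsA v =
      pvPairUp (v.take 1 ++ pvGapFlat v).dropLast ++
        [((v.take 1 ++ pvGapFlat v).getLast (by rintro he; rw [he] at hm; simp at hm), v.getLast hv)] := by
    rw [← hR]; exact pvPairUp_snoc_odd _ _ hm
  rw [pvRunsA_pairUp, htake, hdrop, hgap]
  by_cases hx : x = v.getLast hv + 1
  · subst hx
    have hng : ¬ (1 < v.getLast hv + 1 - v.getLast hv) := by omega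
    rw [if_neg hng, List.append_nil, if_pos rfl, pvPairUp_snoc_odd _ _ hm, hRv]
    simp
  · have hg : 1 < x - v.getLast hv := by omega
    rw [if_neg hx, if_pos hg]
    have hassoc : v.take 1 ++ (pvGapFlat v ++ [v.getLast hv, x]) ++ [x] =
        ((v.take 1 ++ pvGapFlat v) ++ [v.getLast hv]) ++ [x, x] := by
      simp [List.append_assoc]
    rw [hassoc, pvPairUp_append_even _ _ (by simp only [List.length_append, List.length_cons, List.length_nil] at hm ⊢; omega), hR]
    rfl

-- pvBUpdate on a state whose last run ends at w, fed a larger index x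
theorem pvBUpdate_snoc (r : List (Int × Int)) (s w x : Int) (hs : r.getLast? = some (s, w))
    (hwx : w < x) :
    pvBUpdate r x = if x = w + 1 then r.dropLast ++ [(s, x)] else r ++ [(x, x)] := by
  simp only [pvBUpdate, hs]
  by_cases h : x = w + 1
  · simp [h]
  · rw [if_neg h, if_neg (by simpa using h), if_pos (by omega)]

-- the last run ends at the last index
theorem pvLastRun (v : List Int) (hp : v.Pairwise (· < ·)) (hv : v ≠ []) :
    ∃ s, (v.foldl pvBUpdate []).getLast? = some (s, v.getLast hv) := by
  induction v using List.reverseRecOn with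
  | nil => exact absurd rfl hv
  | append_singleton l x ih =>
    rw [List.foldl_append, List.getLast_concat, List.foldl_cons, List.foldl_nil]
    rcases List.eq_nil_or_concat l with rfl | ⟨l2, w, rfl⟩
    · exact ⟨x, rfl⟩
    · simp only [List.concat_eq_append] at *
      have hl : (l2 ++ [w] : List Int) ≠ [] := by simp
      have hpl : (l2 ++ [w] : List Int).Pairwise (· < ·) :=
        (List.pairwise_append.mp hp).1
      have hwx : w < x := (List.pairwise_append.mp hp).2.2 w (by simp) x (by simp)
      obtain ⟨s, hs⟩ := ih hpl hl
      rw [List.getLast_concat] at hs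
      rw [pvBUpdate_snoc _ s w x hs hwx]
      split_ifs with h
      · exact ⟨s, by simp⟩
      · exact ⟨x, by simp⟩

-- main bridge: A's gap/edges computation equals B's incremental fold, on increasing input
theorem pvRunsA_eq_foldl (v : List Int) (hp : v.Pairwise (· < ·)) :
    pvRunsA v = v.foldl pvBUpdate [] := by
  induction v using List.reverseRecOn with
  | nil => rfl
  | append_singleton l x ih =>
    rcases List.eq_nil_or_concat l with rfl | ⟨l2, w, rfl⟩
    · rfl
    · simp only [List.concat_eq_append] at *
      have hl : (l2 ++ [w] : List Int) ≠ [] := by simp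
      have hpl : (l2 ++ [w] : List Int).Pairwise (· < ·) :=
        (List.pairwise_append.mp hp).1
      have hwx : w < x := (List.pairwise_append.mp hp).2.2 w (by simp) x (by simp)
      have hgl : (l2 ++ [w] : List Int).getLast hl = w := by simp
      obtain ⟨s, hs⟩ := pvLastRun _ hpl hl
      rw [hgl] at hs
      rw [pvRunsA_snoc _ hl x (by rw [hgl]; exact hwx), hgl, ih hpl]
      generalize hu : (l2 ++ [w] : List Int) = u at hs ⊢
      rw [List.foldl_append, List.foldl_cons, List.foldl_nil,
          pvBUpdate_snoc _ s w x hs hwx]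
      split_ifs with h
      · simp [hs]
      · rfl

-- skip step: re-seeing the current last index changes nothing
theorem pvBUpdate_last (v : List Int) (hp : v.Pairwise (· < ·)) (hv : v ≠ []) :
    pvBUpdate (v.foldl pvBUpdate []) (v.getLast hv) = v.foldl pvBUpdate [] := by
  obtain ⟨s, hs⟩ := pvLastRun v hp hv
  simp [pvBUpdate, hs]

-- a member bounding the whole increasing list is its last element
theorem pvMem_last (v : List Int) (hp : v.Pairwise (· < ·)) (i : Int) (hm : i ∈ v)
    (hb : ∀ j ∈ v, j ≤ i) : ∃ (hv : v ≠ []), v.getLast hv = i := by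
  have hv : v ≠ [] := by rintro rfl; simp at hm
  refine ⟨hv, ?_⟩
  rcases List.eq_nil_or_concat v with rfl | ⟨l, w, rfl⟩
  · exact absurd rfl hv
  · simp only [List.concat_eq_append] at *
    rw [List.getLast_concat]
    have hwle : w ≤ i := hb w (by simp)
    rcases List.mem_append.mp hm with h | h
    · have := (List.pairwise_append.mp hp).2.2 i h w (by simp)
      omega
    · simp at h; exact h.symm

-- the joint invariant carried through both dict-building folds
def pvInv (dA : PySem.Dict String (PySem.Set Int)) (dB : PySem.Dict String (List (Int × Int))) (n : Int) : Prop :=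
  dA.keys = dB.keys ∧ dA.keys.Nodup ∧ dB.keys.Nodup ∧
  ∀ j : String, (dA.getD j PySem.Set.empty).Pairwise (· < ·) ∧
    (∀ i ∈ dA.getD j PySem.Set.empty, i < n) ∧
    dB.getD j [] = (dA.getD j PySem.Set.empty).foldl pvBUpdate []

theorem pvStep (job : String) (idx : Int) (dA : PySem.Dict String (PySem.Set Int))
    (dB : PySem.Dict String (List (Int × Int))) (h : pvInv dA dB (idx + 1)) :
    pvInv (dA.modify job PySem.Set.empty (fun s => PySem.Set.add s idx))
          (dB.modify job [] (fun r => pvBUpdate r idx)) (idx + 1) := by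
  obtain ⟨hk, hnA, hnB, hval⟩ := h
  have hck : dA.contains job = dB.contains job := by
    by_cases hc : dA.contains job = true
    · rw [hc]
      exact ((PySem.Dict.contains_iff_mem_keys dB job).mpr
        (hk ▸ (PySem.Dict.contains_iff_mem_keys dA job).mp hc)).symm
    · rw [Bool.not_eq_true] at hc
      rw [hc]
      refine (Bool.not_eq_true _ ▸ fun hb => ?_ : dB.contains job = false).symm
      exact absurd ((PySem.Dict.contains_iff_mem_keys dA job).mpr
        (hk ▸ (PySem.Dict.contains_iff_mem_keys dB job).mp hb)) (by rw [hc]; simp)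
  have hkeys : (dA.modify job PySem.Set.empty (fun s => PySem.Set.add s idx)).keys =
      (dB.modify job [] (fun r => pvBUpdate r idx)).keys := by
    rw [PySem.Dict.keys_modify, PySem.Dict.keys_modify]
    by_cases hc : dA.contains job = true
    · rw [PySem.Dict.keys_insert_of_contains _ _ hc,
          PySem.Dict.keys_insert_of_contains _ _ (hck ▸ hc), hk]
    · rw [Bool.not_eq_true] at hc
      rw [PySem.Dict.keys_insert_of_not_contains _ _ hc,
          PySem.Dict.keys_insert_of_not_contains _ _ (hck ▸ hc), hk]
  refine ⟨hkeys, ?_, ?_, ?_⟩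
  · rw [PySem.Dict.keys_modify]
    by_cases hc : dA.contains job = true
    · rwa [PySem.Dict.keys_insert_of_contains _ _ hc]
    · rw [Bool.not_eq_true] at hc
      rw [PySem.Dict.keys_insert_of_not_contains _ _ hc]
      simp only [List.nodup_append, List.nodup_cons, List.nodup_nil]
      refine ⟨hnA, by simp, ?_⟩
      intro a ha b hb
      simp only [List.mem_singleton] at hb
      subst hb
      rintro rfl
      exact absurd ((PySem.Dict.contains_iff_mem_keys dA a).mpr ha) (by rw [hc]; simp)
  · rw [← hkeys]
    rw [PySem.Dict.keys_modify]
    by_cases hc : dA.contains job = true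
    · rwa [PySem.Dict.keys_insert_of_contains _ _ hc]
    · rw [Bool.not_eq_true] at hc
      rw [PySem.Dict.keys_insert_of_not_contains _ _ hc]
      simp only [List.nodup_append, List.nodup_cons, List.nodup_nil]
      refine ⟨hnA, by simp, ?_⟩
      intro a ha b hb
      simp only [List.mem_singleton] at hb
      subst hb
      rintro rfl
      exact absurd ((PySem.Dict.contains_iff_mem_keys dA a).mpr ha) (by rw [hc]; simp)
  · intro j
    obtain ⟨hpj, hbj, heq⟩ := hval j
    rw [PySem.Dict.getD_modify, PySem.Dict.getD_modify]
    by_cases hj : j = job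
    · rw [if_pos hj, if_pos hj]
      subst hj
      rw [PySem.Set.add_eq_ite]
      by_cases hmem : idx ∈ dA.getD j PySem.Set.empty
      · rw [if_pos hmem]
        refine ⟨hpj, hbj, ?_⟩
        have hb2 : ∀ i ∈ dA.getD j PySem.Set.empty, i ≤ idx := fun i hi => by
          have := hbj i hi; omega
        obtain ⟨hne, hlast⟩ := pvMem_last _ hpj idx hmem hb2
        rw [heq, ← hlast]
        exact pvBUpdate_last _ hpj hne
      · rw [if_neg hmem]
        have hlt : ∀ a ∈ dA.getD j PySem.Set.empty, a < idx := fun a ha => by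
          have h1 := hbj a ha
          have : a ≠ idx := fun he => hmem (he ▸ ha)
          omega
        refine ⟨?_, ?_, ?_⟩
        · exact List.pairwise_append.mpr ⟨hpj, by simp,
            fun a ha b hb => by simp only [List.mem_singleton] at hb; exact hb ▸ hlt a ha⟩
        · intro i hi
          rcases List.mem_append.mp hi with h | h
          · exact hbj i h
          · simp only [List.mem_singleton] at h; omega
        · rw [List.foldl_append, List.foldl_cons, List.foldl_nil, heq]
    · rw [if_neg hj, if_neg hj]
      exact ⟨hpj, hbj, heq⟩

theorem pvInner (lst : List String) (idx : Int) (dA : PySem.Dict String (PySem.Set Int))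
    (dB : PySem.Dict String (List (Int × Int))) (h : pvInv dA dB (idx + 1)) :
    pvInv (lst.foldl (fun d job => d.modify job PySem.Set.empty (fun s => PySem.Set.add s idx)) dA)
          (lst.foldl (fun d job => d.modify job [] (fun r => pvBUpdate r idx)) dB) (idx + 1) := by
  induction lst generalizing dA dB with
  | nil => exact h
  | cons job rest ih => exact ih _ _ (pvStep job idx dA dB h)

theorem pvInv_mono (dA : PySem.Dict String (PySem.Set Int))
    (dB : PySem.Dict String (List (Int × Int))) (n m : Int) (hnm : n ≤ m)
    (h : pvInv dA dB n) : pvInv dA dB m := by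
  obtain ⟨hk, hnA, hnB, hval⟩ := h
  refine ⟨hk, hnA, hnB, fun j => ?_⟩
  obtain ⟨hpj, hbj, heq⟩ := hval j
  exact ⟨hpj, fun i hi => lt_of_lt_of_le (hbj i hi) hnm, heq⟩

theorem pvOuter (jobs : List (List String)) (n : Int) (dA : PySem.Dict String (PySem.Set Int))
    (dB : PySem.Dict String (List (Int × Int))) (h : pvInv dA dB n) :
    pvInv ((PySem.List.enumerate jobs n).foldl
            (fun d p => p.2.foldl (fun d job => d.modify job PySem.Set.empty (fun s => PySem.Set.add s p.1)) d) dA)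
          ((PySem.List.enumerate jobs n).foldl
            (fun d p => p.2.foldl (fun d job => d.modify job [] (fun r => pvBUpdate r p.1)) d) dB)
          (n + jobs.length) := by
  induction jobs generalizing n dA dB with
  | nil => simpa [PySem.List.enumerate] using h
  | cons lst rest ih =>
    rw [PySem.List.enumerate_cons, List.foldl_cons, List.foldl_cons]
    have h1 := pvInner lst n dA dB (pvInv_mono dA dB n (n + 1) (by omega) h)
    have h2 := ih (n + 1) _ _ h1
    refine pvInv_mono _ _ _ _ (le_of_eq ?_) h2
    simp only [List.length_cons]
    push_cast
    ring

-- ===== VERDICT (by name: the statement is the Claim_ definition above) =====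
theorem get_first_last_spec : Claim_equal_get_first_last := by
  intro jobs _
  show get_first_last jobs = get_first_last_alt jobs
  unfold get_first_last get_first_last_alt
  dsimp only
  set dA : PySem.Dict String (PySem.Set Int) :=
    (PySem.List.enumerate jobs 0).foldl
      (fun d p => p.2.foldl (fun d job => d.modify job PySem.Set.empty (fun s => PySem.Set.add s p.1)) d)
      PySem.Dict.empty with hdA
  set dB : PySem.Dict String (List (Int × Int)) :=
    (PySem.List.enumerate jobs 0).foldl
      (fun d p => p.2.foldl (fun d job => d.modify job [] (fun r => pvBUpdate r p.1)) d)
      PySem.Dict.empty with hdB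
  have hinv : pvInv dA dB (0 + jobs.length) := by
    rw [hdA, hdB]
    refine pvOuter jobs 0 PySem.Dict.empty PySem.Dict.empty ?_
    refine ⟨rfl, ?_, ?_, fun j => ?_⟩
    · rw [PySem.Dict.keys_empty]; exact List.nodup_nil
    · rw [PySem.Dict.keys_empty]; exact List.nodup_nil
    · rw [PySem.Dict.getD_empty, PySem.Dict.getD_empty]
      exact ⟨List.Pairwise.nil, by simp, rfl⟩
  obtain ⟨hk, hnA, hnB, hval⟩ := hinv
  have hmapA : (dA.items.map (fun kv => kv.1)).Nodup := hnA
  have hitems1 : (dA.items.foldl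
      (fun d kv => d.insert kv.1 (PySem.List.sorted kv.2 (fun x => x) false)) PySem.Dict.empty).items =
      dA.items.map (fun kv => (kv.1, PySem.List.sorted kv.2 (fun x => x) false)) := by
    have := PySem.Dict.items_foldl_insert_fresh dA.items (fun kv => kv.1)
      (fun kv => PySem.List.sorted kv.2 (fun x => x) false) PySem.Dict.empty
      (fun a _ => PySem.Dict.contains_empty _) hmapA
    simpa using this
  rw [hitems1]
  have hmapA2 : (((dA.items.map (fun kv => (kv.1, PySem.List.sorted kv.2 (fun x => x) false))).map
      (fun kv => kv.1)).Nodup) := by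
    rw [List.map_map]
    exact hmapA
  have hitems2 : (((dA.items.map (fun kv => (kv.1, PySem.List.sorted kv.2 (fun x => x) false))).foldl
      (fun d kv => d.insert kv.1 (pvRunsA kv.2)) PySem.Dict.empty).items) =
      (dA.items.map (fun kv => (kv.1, PySem.List.sorted kv.2 (fun x => x) false))).map
        (fun kv => (kv.1, pvRunsA kv.2)) := by
    have := PySem.Dict.items_foldl_insert_fresh
      (dA.items.map (fun kv => (kv.1, PySem.List.sorted kv.2 (fun x => x) false)))
      (fun kv => kv.1) (fun kv => pvRunsA kv.2) PySem.Dict.empty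
      (fun a _ => PySem.Dict.contains_empty _) hmapA2
    simpa using this
  rw [hitems2, List.map_map]
  rw [PySem.Dict.items_eq_map_keys dA hnA PySem.Set.empty,
      PySem.Dict.items_eq_map_keys dB hnB [], ← hk, List.map_map]
  refine List.map_congr_left fun k hkm => ?_
  obtain ⟨hp, hb, heq⟩ := hval k
  simp only [Function.comp]
  rw [PySem.List.sorted_eq_self_of_pairwise _ _ (hp.imp (fun h => le_of_lt h)),
      pvRunsA_eq_foldl _ hp, heq]
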